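-- pv_equiv track=rewrite | github.com/Progery222/astro-tma | backend/scripts/update_image_keys.py | get_image_key
-- ===== SOURCE A (Python) =====
-- MAJOR_ORDER = [
--     "The Fool", "The Magician", "The High Priestess", "The Empress",
--     "The Emperor", "The Hierophant", "The Lovers", "The Chariot",
--     "Strength", "The Hermit", "Wheel of Fortune", "Justice",
--     "The Hanged Man", "Death", "Temperance", "The Devil",
--     "The Tower", "The Star", "The Moon", "The Sun",
--     "Judgement", "The World",
-- ]
--
-- SUIT_ORDER = ["Wands", "Cups", "Swords", "Pentacles"]
--
-- RANK_ORDER = [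
--     "Ace", "Two", "Three", "Four", "Five", "Six", "Seven",
--     "Eight", "Nine", "Ten", "Page", "Knight", "Queen", "King",
-- ]
--
-- def get_image_key(name_en: str) -> str:
--     """Convert card name_en to image filename."""
--     # Major arcana
--     if name_en in MAJOR_ORDER:
--         idx = MAJOR_ORDER.index(name_en)
--         return f"{idx:02d}_{name_en.replace(' ', '_')}.webp"
--
--     # Minor arcana: "Ace of Wands" -> index 22, etc.
--     for suit_idx, suit in enumerate(SUIT_ORDER):
--         if name_en.endswith(f"of {suit}"):
--             rank = name_en.replace(f" of {suit}", "")
--             if rank in RANK_ORDER: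
--                 rank_idx = RANK_ORDER.index(rank)
--                 idx = 22 + suit_idx * 14 + rank_idx
--                 return f"{idx:02d}_{name_en.replace(' ', '_')}.webp"
--
--     return None
-- ===== SOURCE B (Python) =====
-- MAJOR_ORDER = [
--     "The Fool", "The Magician", "The High Priestess", "The Empress",
--     "The Emperor", "The Hierophant", "The Lovers", "The Chariot",
--     "Strength", "The Hermit", "Wheel of Fortune", "Justice",
--     "The Hanged Man", "Death", "Temperance", "The Devil",
--     "The Tower", "The Star", "The Moon", "The Sun",
--     "Judgement", "The World",
-- ]
--
-- SUIT_ORDER = ["Wands", "Cups", "Swords", "Pentacles"]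
--
-- RANK_ORDER = [
--     "Ace", "Two", "Three", "Four", "Five", "Six", "Seven",
--     "Eight", "Nine", "Ten", "Page", "Knight", "Queen", "King",
-- ]
--
-- IMAGE_KEYS = {}
-- for _idx, _name in enumerate(MAJOR_ORDER):
--     IMAGE_KEYS[_name] = f"{_idx:02d}_{_name.replace(' ', '_')}.webp"
-- for _s_idx, _suit in enumerate(SUIT_ORDER):
--     for _r_idx, _rank in enumerate(RANK_ORDER):
--         _nm = f"{_rank} of {_suit}"
--         _i = 22 + _s_idx * 14 + _r_idx
--         IMAGE_KEYS[_nm] = f"{_i:02d}_{_nm.replace(' ', '_')}.webp"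
--
-- def get_image_key(name_en: str) -> str:
--     """Convert card name_en to image filename."""
--     return IMAGE_KEYS.get(name_en)
-- ===== Notes on version B (the rewrite author's own statement) =====
-- stated objective: simpler
-- what changed: A's per-call membership test, list.index, and endswith/replace suit-scanning are replaced by one dict built once from the same order lists, so get_image_key is a single table lookup.
-- intended difference: On strings that are a rank name with extra copies of a space+of+space+suit segment inserted and that end in such a segment, e.g. 'Ace of Wands of Wands', A's replace-all strips every copy and returns a numbered filename for this non-card name, while B returns None; None is the intended value since such strings are not card names. — e.g. on get_image_key("Ace of Wands of Wands"): A returns some "22_Ace_of_Wands_of_Wands.webp", B returns none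
import Mathlib
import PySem

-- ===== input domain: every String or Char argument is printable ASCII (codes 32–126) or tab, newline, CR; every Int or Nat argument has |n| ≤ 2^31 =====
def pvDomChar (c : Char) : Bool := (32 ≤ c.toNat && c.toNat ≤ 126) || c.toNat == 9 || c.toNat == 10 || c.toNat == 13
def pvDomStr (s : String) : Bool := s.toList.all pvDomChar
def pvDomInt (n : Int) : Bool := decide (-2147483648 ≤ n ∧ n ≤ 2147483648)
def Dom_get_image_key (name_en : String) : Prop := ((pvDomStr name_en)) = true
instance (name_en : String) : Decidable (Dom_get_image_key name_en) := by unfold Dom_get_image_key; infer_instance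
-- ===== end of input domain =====

-- B replaces A's per-call membership/endswith/replace scanning by one lookup in a name→filename
-- table built once from the same order lists (objective: simpler; return value only).

def MAJOR_ORDER : List String := [
    "The Fool", "The Magician", "The High Priestess", "The Empress",
    "The Emperor", "The Hierophant", "The Lovers", "The Chariot",
    "Strength", "The Hermit", "Wheel of Fortune", "Justice",
    "The Hanged Man", "Death", "Temperance", "The Devil",
    "The Tower", "The Star", "The Moon", "The Sun",
    "Judgement", "The World"]

def SUIT_ORDER : List String := ["Wands", "Cups", "Swords", "Pentacles"]

def RANK_ORDER : List String := [
    "Ace", "Two", "Three", "Four", "Five", "Six", "Seven",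
    "Eight", "Nine", "Ten", "Page", "Knight", "Queen", "King"]

-- f"{idx:02d}_{nm.replace(' ', '_')}.webp" (idx is always ≥ 0 here; 02d = zfill 2)
def pyFmt02 (idx : Int) (nm : String) : String :=
  PySem.Str.zfill (PySem.Int.toStr idx) 2 ++ "_" ++ PySem.Str.replace nm " " "_" ++ ".webp"

-- ===== PORT A =====
def minor_loop (name_en : String) : List (Int × String) → Option String
  | [] => none
  | (suit_idx, suit) :: rest =>
    if PySem.Str.endswith name_en ("of " ++ suit) then
      let rank := PySem.Str.replace name_en (" of " ++ suit) ""
      if RANK_ORDER.contains rank then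
        match PySem.List.index? RANK_ORDER rank with
        | some rank_idx => some (pyFmt02 (22 + suit_idx * 14 + (rank_idx : Int)) name_en)
        | none => none      -- unreachable: rank ∈ RANK_ORDER
      else minor_loop name_en rest
    else minor_loop name_en rest

def get_image_key (name_en : String) : Option String :=
  if MAJOR_ORDER.contains name_en then
    match PySem.List.index? MAJOR_ORDER name_en with
    | some idx => some (pyFmt02 (idx : Int) name_en)
    | none => none          -- unreachable: name_en ∈ MAJOR_ORDER
  else
    minor_loop name_en (PySem.List.enumerate SUIT_ORDER)

-- ===== PORT B =====
def IMAGE_KEYS : PySem.Dict String String :=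
  let d := (PySem.List.enumerate MAJOR_ORDER).foldl
      (fun d p => d.insert p.2 (pyFmt02 p.1 p.2)) PySem.Dict.empty
  (PySem.List.enumerate SUIT_ORDER).foldl (fun d sp =>
    (PySem.List.enumerate RANK_ORDER).foldl (fun d rp =>
      let nm := rp.2 ++ " of " ++ sp.2
      d.insert nm (pyFmt02 (22 + sp.1 * 14 + rp.1) nm)) d) d

def get_image_key_alt (name_en : String) : Option String :=
  IMAGE_KEYS.get? name_en

-- ===== PRECONDITION & SPEC =====
-- pvIns p fuel r n: n is r with some copies of the pattern p inserted (fuel ≥ 2*|n|+1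
-- suffices). A structural interleaving predicate on the input; it computes no output of
-- either program.
def pvIns (p : List Char) : Nat → List Char → List Char → Bool
  | 0, r, n => r.isEmpty && n.isEmpty
  | f+1, r, n =>
    (p.isPrefixOf n && pvIns p f r (n.drop p.length)) ||
    (match r, n with
     | d :: rt, c :: t => c == d && pvIns p f rt t
     | _, _ => r.isEmpty && n.isEmpty)

-- On strings that are a rank name with extra copies of a space+of+space+suit segment inserted
-- and that end in such a segment, e.g. "Ace of Wands of Wands", A's replace-all strips every
-- copy and returns a numbered filename for this non-card name, while B returns None; None is
-- the intended value since such strings are not card names.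
def D_get_image_key (name_en : String) : Prop :=
  ∃ s ∈ SUIT_ORDER, ∃ r ∈ RANK_ORDER,
    PySem.Str.endswith name_en ("of " ++ s) = true ∧
    pvIns (" of " ++ s).toList (2 * name_en.toList.length + 1) r.toList name_en.toList = true ∧
    name_en ≠ r ++ " of " ++ s
instance (name_en : String) : Decidable (D_get_image_key name_en) := by
  unfold D_get_image_key; infer_instance

def Spec_get_image_key (name_en : String) (out : Option String) : Prop :=
  ¬ D_get_image_key name_en → out = get_image_key_alt name_en
instance (name_en : String) (out : Option String) : Decidable (Spec_get_image_key name_en out) := by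
  unfold Spec_get_image_key; infer_instance

def pvDiffWitness_get_image_key : String := "Ace of Wands of Wands"
def pvDiffWitnessOut_get_image_key : (Option String) × (Option String) :=
  (some "22_Ace_of_Wands_of_Wands.webp", none)

-- ===== CLAIM (what is proved, stated in full; the proofs are below) =====
def Claim_unchanged_get_image_key : Prop := ∀ (name_en : String), Dom_get_image_key name_en → Spec_get_image_key name_en (get_image_key name_en)
def Claim_changed_get_image_key : Prop := Dom_get_image_key (pvDiffWitness_get_image_key) ∧ D_get_image_key (pvDiffWitness_get_image_key) ∧ get_image_key (pvDiffWitness_get_image_key) = pvDiffWitnessOut_get_image_key.1 ∧ get_image_key_alt (pvDiffWitness_get_image_key) = pvDiffWitnessOut_get_image_key.2 ∧ pvDiffWitnessOut_get_image_key.1 ≠ pvDiffWitnessOut_get_image_key.2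
def Claim_exact_get_image_key : Prop := ∀ (name_en : String), Dom_get_image_key name_en → D_get_image_key name_en → get_image_key name_en ≠ get_image_key_alt name_en

-- ===== LEMMAS AND PROOFS =====

-- all 78 valid card names (same strings as the table's keys)
def ALL_KEYS : List String :=
  MAJOR_ORDER ++ SUIT_ORDER.flatMap (fun s => RANK_ORDER.map (fun r => r ++ " of " ++ s))


def remAll (pc : Char) (pt : List Char) (n : List Char) : List Char :=
  match n with
  | [] => []
  | c :: t =>
    if (pc :: pt).isPrefixOf (c :: t) then remAll pc pt (t.drop pt.length)
    else c :: remAll pc pt t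
termination_by n.length
decreasing_by
  · simp only [List.length_cons, List.length_drop]
    omega
  · simp

theorem remAll_nil (pc : Char) (pt : List Char) : remAll pc pt [] = [] := by rw [remAll]

theorem replace_go_eq (pc : Char) (pt : List Char) :
    ∀ (fuel : Nat) (l acc : List Char), l.length ≤ fuel →
      PySem.Chars.replace.go (pc :: pt) [] fuel l acc = acc.reverse ++ remAll pc pt l := by
  intro fuel
  induction fuel with
  | zero =>
    intro l acc h
    have hl : l = [] := by cases l <;> simp_all
    subst hl
    rw [PySem.Chars.replace.go, remAll]
  | succ f ih =>
    intro l acc h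
    cases l with
    | nil =>
      rw [PySem.Chars.replace.go, remAll]
      · simp
      · omega
    | cons c t =>
      rw [PySem.Chars.replace.go, remAll]
      simp only [List.length_cons, List.drop_succ_cons]
      by_cases hp : (pc :: pt).isPrefixOf (c :: t)
      · simp only [hp, if_pos]
        rw [ih]
        · simp
        · simp only [List.length_drop, List.length_cons] at h ⊢
          omega
      · simp only [hp, Bool.false_eq_true, if_neg, not_false_iff]
        rw [ih]
        · simp
        · simp only [List.length_cons] at h; omega

theorem replace_eq_remAll (pc : Char) (pt n : List Char) :
    PySem.Chars.replace n (pc :: pt) [] = remAll pc pt n := by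
  rw [PySem.Chars.replace]
  simp only [List.isEmpty_cons, Bool.false_eq_true, if_neg, not_false_iff]
  simpa using replace_go_eq pc pt n.length n [] le_rfl

theorem ins_iff (pt : List Char) :
    ∀ (fuel : Nat) (n r : List Char), 2 * n.length < fuel → ' ' ∉ r →
      (pvIns (' ' :: pt) fuel r n = true ↔ remAll ' ' pt n = r) := by
  intro fuel
  induction fuel using Nat.strong_induction_on with
  | _ fuel ih =>
    intro n r hlen hr
    cases fuel with
    | zero => omega
    | succ f =>
      cases n with
      | nil =>
        rw [remAll_nil]
        simp only [pvIns]
        cases r <;> simp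
      | cons c t =>
        have hlt : 2 * t.length < f := by simp at hlen; omega
        rw [remAll]
        simp only [pvIns]
        by_cases hp : (' ' :: pt).isPrefixOf (c :: t)
        · have hc : c = ' ' := by
            simp only [List.isPrefixOf, Bool.and_eq_true, beq_iff_eq] at hp
            exact hp.1.symm
          subst hc
          simp only [hp, if_pos, Bool.true_and]
          have key : pvIns (' ' :: pt) f r ((' ' :: t).drop (' ' :: pt).length) = true ↔
              remAll ' ' pt (t.drop pt.length) = r := by
            simp only [List.length_cons, List.drop_succ_cons]
            exact ih f (by omega) (t.drop pt.length) r
              (by simp [List.length_drop]; omega) hr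
          cases r with
          | nil => simpa using key
          | cons d rt =>
            have hd : (' ' == d) = false := by
              have hne : d ≠ ' ' := fun h => hr (h ▸ List.mem_cons_self ..)
              simp [Ne.symm hne]
            simpa [hd] using key
        · have hp' : (' ' :: pt).isPrefixOf (c :: t) = false := by
            cases hx : (' ' :: pt).isPrefixOf (c :: t)
            · rfl
            · exact absurd hx hp
          simp only [hp', Bool.false_and, Bool.false_or]
          cases r with
          | nil => simp
          | cons d rt =>
            have hrt : ' ' ∉ rt := fun h => hr (List.mem_cons_of_mem _ h)
            show (c == d && pvIns (' ' :: pt) f rt t) = true ↔ _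
            simp only [Bool.and_eq_true, beq_iff_eq, ih f (by omega) t rt hlt hrt]
            simp

set_option maxRecDepth 1000000 in
theorem keys_IMAGE : IMAGE_KEYS.keys = ALL_KEYS := by decide

theorem alt_none_of_not_key (name_en : String) (h : name_en ∉ ALL_KEYS) :
    get_image_key_alt name_en = none := by
  unfold get_image_key_alt
  exact (PySem.Dict.get?_eq_none_iff_not_mem_keys IMAGE_KEYS name_en).mpr (keys_IMAGE ▸ h)

set_option maxRecDepth 1000000 in
theorem keys_agree : ∀ k ∈ ALL_KEYS, get_image_key k = get_image_key_alt k := by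
  decide

theorem ranks_no_space : ∀ r ∈ RANK_ORDER, ' ' ∉ r.toList := by decide

theorem suit_pat_toList (s : String) :
    (" of " ++ s).toList = ' ' :: ("of " ++ s).toList := by
  simp [String.toList_append]

theorem str_replace_eq (name s : String) :
    (PySem.Str.replace name (" of " ++ s) "").toList =
      remAll ' ' ("of " ++ s).toList name.toList := by
  rw [PySem.Str.toList_replace, suit_pat_toList]
  exact replace_eq_remAll _ _ _

theorem pat_cons (s : String) :
    (" of " ++ s).toList = ' ' :: ("of " ++ s).toList := suit_pat_toList s

theorem accept_imp (name s r : String) (hr : r ∈ RANK_ORDER)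
    (hrep : PySem.Str.replace name (" of " ++ s) "" = r) :
    pvIns (" of " ++ s).toList (2 * name.toList.length + 1) r.toList name.toList = true := by
  rw [pat_cons]
  apply (ins_iff _ _ _ _ (by omega) (ranks_no_space r hr)).mpr
  rw [← str_replace_eq, hrep]

theorem ins_imp_replace (name s r : String) (hr : r ∈ RANK_ORDER)
    (hins : pvIns (" of " ++ s).toList (2 * name.toList.length + 1) r.toList name.toList = true) :
    PySem.Str.replace name (" of " ++ s) "" = r := by
  apply String.toList_inj.mp
  rw [str_replace_eq]
  rw [pat_cons] at hins
  exact (ins_iff _ _ _ _ (by omega) (ranks_no_space r hr)).mp hins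

theorem minor_none (name : String) :
    ∀ L : List (Int × String),
      (∀ p ∈ L, ¬(PySem.Str.endswith name ("of " ++ p.2) = true ∧
        RANK_ORDER.contains (PySem.Str.replace name (" of " ++ p.2) "") = true)) →
      minor_loop name L = none := by
  intro L
  induction L with
  | nil => intro _; rfl
  | cons p rest ih =>
    intro h
    obtain ⟨si, su⟩ := p
    rw [minor_loop]
    by_cases he : PySem.Str.endswith name ("of " ++ su) = true
    · have hc : RANK_ORDER.contains (PySem.Str.replace name (" of " ++ su) "") = false := by
        cases hx : RANK_ORDER.contains (PySem.Str.replace name (" of " ++ su) "")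
        · rfl
        · exact absurd ⟨he, hx⟩ (h (si, su) List.mem_cons_self)
      simp only [he, if_pos, hc, Bool.false_eq_true, if_neg, not_false_iff]
      exact ih fun q hq => h q (List.mem_cons_of_mem _ hq)
    · simp only [he]
      exact ih fun q hq => h q (List.mem_cons_of_mem _ hq)

theorem major_contains_false (name : String) (h : name ∉ ALL_KEYS) :
    MAJOR_ORDER.contains name = false := by
  cases hx : MAJOR_ORDER.contains name
  · rfl
  · exact absurd (List.mem_append_left _ (List.mem_of_elem_eq_true hx)) h

theorem suit_suffix_eq :
    ∀ s ∈ SUIT_ORDER, ∀ s' ∈ SUIT_ORDER,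
      ("of " ++ s).toList <:+ ("of " ++ s').toList → s = s' := by decide

theorem endswith_suit_unique (name s s' : String) (hs : s ∈ SUIT_ORDER)
    (hs' : s' ∈ SUIT_ORDER)
    (h1 : PySem.Str.endswith name ("of " ++ s) = true)
    (h2 : PySem.Str.endswith name ("of " ++ s') = true) : s = s' := by
  rw [PySem.Str.endswith_eq, PySem.Chars.endswith_iff] at h1 h2
  rcases List.suffix_or_suffix_of_suffix h1 h2 with h | h
  · exact suit_suffix_eq s hs s' hs' h
  · exact (suit_suffix_eq s' hs' s hs h).symm

theorem minor_some (name s : String)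
    (hrep : RANK_ORDER.contains (PySem.Str.replace name (" of " ++ s) "") = true)
    (hex : ∀ s' ∈ SUIT_ORDER, PySem.Str.endswith name ("of " ++ s') = true → s' = s) :
    ∀ L : List (Int × String), (∃ p ∈ L, p.2 = s ∧ PySem.Str.endswith name ("of " ++ s) = true) →
      (∀ p ∈ L, p.2 ∈ SUIT_ORDER) → minor_loop name L ≠ none := by
  intro L
  induction L with
  | nil => rintro ⟨p, hp, _⟩ _; cases hp
  | cons p rest ih =>
    rintro ⟨q, hq, hqs, he⟩ hsub
    obtain ⟨si, su⟩ := p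
    rw [minor_loop]
    by_cases hpe : PySem.Str.endswith name ("of " ++ su) = true
    · have hsu : su = s := hex su (hsub (si, su) List.mem_cons_self) hpe
      subst hsu
      simp only [hpe, if_pos, hrep, if_pos]
      have hmem : PySem.Str.replace name (" of " ++ su) "" ∈ RANK_ORDER :=
        List.mem_of_elem_eq_true hrep
      have hidx := (PySem.List.index?_isSome_iff RANK_ORDER _).mpr hmem
      cases hx : PySem.List.index? RANK_ORDER (PySem.Str.replace name (" of " ++ su) "") with
      | none => rw [hx] at hidx; simp at hidx
      | some k => simp
    · simp only [hpe]
      have hq' : q ∈ rest := by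
        rcases List.mem_cons.mp hq with rfl | h
        · rw [show su = s from hqs] at hpe
          exact absurd he hpe
        · exact h
      exact ih ⟨q, hq', hqs, he⟩ (fun r hr => hsub r (List.mem_cons_of_mem _ hr))

-- ===== VERDICT (by name: the statement is the Claim_ definition above) =====
theorem key_mem (s : String) (hs : s ∈ SUIT_ORDER) (r : String) (hr : r ∈ RANK_ORDER) :
    r ++ " of " ++ s ∈ ALL_KEYS := by
  unfold ALL_KEYS
  exact List.mem_append_right _ (List.mem_flatMap.mpr ⟨s, hs, List.mem_map_of_mem hr⟩)

theorem get_image_key_spec : Claim_unchanged_get_image_key := by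
  unfold Claim_unchanged_get_image_key Spec_get_image_key
  intro name _ hnd
  by_cases hk : name ∈ ALL_KEYS
  · exact keys_agree name hk
  · rw [alt_none_of_not_key name hk]
    unfold get_image_key
    simp only [major_contains_false name hk, Bool.false_eq_true, if_neg, not_false_iff]
    apply minor_none
    rintro p hp ⟨he, hc⟩
    have hs : p.2 ∈ SUIT_ORDER := by
      have hmap := PySem.List.map_snd_enumerate SUIT_ORDER 0
      exact hmap ▸ List.mem_map_of_mem hp
    have hrank : PySem.Str.replace name (" of " ++ p.2) "" ∈ RANK_ORDER :=
      List.mem_of_elem_eq_true hc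
    have hne : name ≠ PySem.Str.replace name (" of " ++ p.2) "" ++ " of " ++ p.2 :=
      fun h => hk (h ▸ key_mem p.2 hs _ hrank)
    exact hnd ⟨p.2, hs, _, hrank, he, accept_imp name p.2 _ hrank rfl, hne⟩

set_option maxRecDepth 100000 in
theorem get_image_key_changed : Claim_changed_get_image_key := by
  unfold Claim_changed_get_image_key; decide

theorem majors_no_suit_suffix :
    ∀ m ∈ MAJOR_ORDER, ∀ s ∈ SUIT_ORDER,
      PySem.Str.endswith m ("of " ++ s) = false := by decide

theorem key_endswith :
    ∀ s ∈ SUIT_ORDER, ∀ r ∈ RANK_ORDER,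
      PySem.Str.endswith (r ++ " of " ++ s) ("of " ++ s) = true := by decide

theorem key_replace :
    ∀ s ∈ SUIT_ORDER, ∀ r ∈ RANK_ORDER,
      PySem.Str.replace (r ++ " of " ++ s) (" of " ++ s) "" = r := by decide

theorem get_image_key_tight : Claim_exact_get_image_key := by
  unfold Claim_exact_get_image_key
  intro name _ hd
  obtain ⟨s, hs, r, hr, he, hins, hne⟩ := hd
  have hrep : PySem.Str.replace name (" of " ++ s) "" = r := ins_imp_replace name s r hr hins
  have hk : name ∉ ALL_KEYS := by
    intro hmem
    rcases List.mem_append.mp hmem with hmaj | hmin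
    · rw [majors_no_suit_suffix name hmaj s hs] at he
      exact Bool.false_ne_true he
    · obtain ⟨s', hs', hmap⟩ := List.mem_flatMap.mp hmin
      obtain ⟨r', hr', hkey⟩ := List.mem_map.mp hmap
      subst hkey
      have hss : s' = s :=
        endswith_suit_unique _ s' s hs' hs (key_endswith s' hs' r' hr') he
      subst hss
      rw [key_replace s' hs' r' hr'] at hrep
      exact hne (by rw [← hrep])
  rw [alt_none_of_not_key name hk]
  unfold get_image_key
  simp only [major_contains_false name hk, Bool.false_eq_true, if_neg, not_false_iff]
  have hrc : RANK_ORDER.contains (PySem.Str.replace name (" of " ++ s) "") = true := by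
    rw [hrep]; exact List.elem_eq_true_of_mem hr
  apply minor_some name s hrc
  · exact fun s' hs' he' => endswith_suit_unique name s' s hs' hs he' he
  · have hmap := PySem.List.map_snd_enumerate SUIT_ORDER 0
    obtain ⟨p, hp, hp2⟩ := List.mem_map.mp (hmap ▸ hs)
    exact ⟨p, hp, hp2, he⟩
  · intro p hp
    have hmap := PySem.List.map_snd_enumerate SUIT_ORDER 0
    exact hmap ▸ List.mem_map_of_mem hp
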